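-- pv_equiv track=rewrite | github.com/ihgazni2/dlixhict-didactic | xdict/elist.py | indexes_seqs
-- ===== SOURCE A (Python) =====
-- def indexes_seqs(ol,value,seqs):
--     '''
--         from xdict.elist import *
--         ol = [1,'a',3,'a',4,'a',5]
--         indexes_seqs(ol,'a',{0,2})
--         indexes_seqs(ol,'a',{0,1})
--         indexes_seqs(ol,'a',{1,2})
--         indexes_seqs(ol,'a',{3,4})
--     '''
--     seqs = list(seqs)
--     length = ol.__len__()
--     indexes =[]
--     seq = -1
--     for i in range(0,length):
--         if(value == ol[i]):
--             seq = seq + 1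
--             if(seq in seqs):
--                 indexes.append(i)
--             else:
--                 pass
--         else:
--             pass
--     return(indexes)
-- ===== SOURCE B (Python) =====
-- def _nth_after(ol, value, pos, steps):
--     # advance `steps` occurrences of value, starting the search at index pos;
--     # returns one past the index of the last occurrence found, or None if exhausted
--     for _ in range(steps):
--         try:
--             pos = ol.index(value, pos) + 1
--         except ValueError:
--             return None
--     return pos
--
-- def indexes_seqs(ol, value, seqs):
--     # rank-driven search: iterate the sorted distinct requested ranks and let
--     # list.index jump from occurrence to occurrence; stop at the first rank
--     # beyond the last occurrence (all later ranks are larger, so none can match)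
--     res, pos, prev = [], 0, -1
--     for k in sorted(set(seqs)):
--         if k < 0:
--             continue
--         pos = _nth_after(ol, value, pos, k - prev)
--         if pos is None:
--             break
--         res.append(pos - 1)
--         prev = k
--     return res
-- ===== Notes on version B (the rewrite author's own statement) =====
-- stated objective: alternative
-- what changed: B is rank-driven instead of element-driven: it iterates the sorted distinct requested ranks and uses list.index to jump from occurrence to occurrence (stopping at the first rank past the last occurrence), whereas A scans every element once while threading a running occurrence counter and testing it against seqs.
import Mathlib
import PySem

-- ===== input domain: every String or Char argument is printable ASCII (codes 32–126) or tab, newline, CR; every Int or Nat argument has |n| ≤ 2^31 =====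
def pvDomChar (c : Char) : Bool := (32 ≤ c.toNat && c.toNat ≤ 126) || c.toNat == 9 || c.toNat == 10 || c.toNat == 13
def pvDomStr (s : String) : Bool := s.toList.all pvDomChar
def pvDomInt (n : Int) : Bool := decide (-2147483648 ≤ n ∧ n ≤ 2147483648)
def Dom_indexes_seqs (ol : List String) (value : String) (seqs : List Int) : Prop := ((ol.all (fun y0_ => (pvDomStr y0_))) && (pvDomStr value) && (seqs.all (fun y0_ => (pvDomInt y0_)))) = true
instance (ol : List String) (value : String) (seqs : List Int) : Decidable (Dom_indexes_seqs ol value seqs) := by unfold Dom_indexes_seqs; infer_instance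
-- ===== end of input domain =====

-- B is rank-driven instead of element-driven: it walks the sorted distinct requested ranks and lets
-- list.index jump from occurrence to occurrence, instead of A's full scan with a running counter.

-- ===== PORT A =====
-- literal port of A: loop i in range(0, len(ol)), running counter seq starting at -1,
-- append i when the occurrence rank is in seqs (ol[i] is always in range, so pyGetD's default is never used)
def indexes_seqs (ol : List String) (value : String) (seqs : List Int) : List Int :=
  let length : Int := PySem.List.len ol
  ((PySem.List.pyRange 0 length 1).foldl
    (fun (st : List Int × Int) i =>
      if value = PySem.List.pyGetD ol i "" then
        let seq := st.2 + 1
        if seq ∈ seqs then (st.1 ++ [i], seq) else (st.1, seq)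
      else st)
    ([], -1)).1

-- ===== PORT B =====
-- hand port of ol.index(value, pos) (PySem.List.index? has no start argument): index? on the
-- dropped prefix plus pos — exact for 0 ≤ pos, and every call in B has pos ≥ 0
def nthAfter (ol : List String) (value : String) (pos : Int) : Nat → Option Int
  | 0 => some pos
  | Nat.succ n =>
    match Option.map (fun k : Nat => pos + (k : Int)) (PySem.List.index? (ol.drop pos.toNat) value) with
    | none => none
    | some i => nthAfter ol value (i + 1) n

-- the main loop of B: over the sorted distinct ranks, skipping negatives, breaking when exhausted
def selLoop (ol : List String) (value : String) : List Int → Int → Int → List Int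
  | [], _, _ => []
  | k :: ks, pos, prev =>
    if k < 0 then selLoop ol value ks pos prev
    else
      match nthAfter ol value pos (k - prev).toNat with
      | none => []
      | some pos' => (pos' - 1) :: selLoop ol value ks pos' k

def indexes_seqs_alt (ol : List String) (value : String) (seqs : List Int) : List Int :=
  selLoop ol value (PySem.List.sorted (PySem.Set.ofList seqs) (fun x => x) false) 0 (-1)

-- ===== PRECONDITION & SPEC =====
def Spec_indexes_seqs (ol : List String) (value : String) (seqs : List Int) (out : List Int) : Prop := out = indexes_seqs_alt ol value seqs
instance (ol : List String) (value : String) (seqs : List Int) (out : List Int) : Decidable (Spec_indexes_seqs ol value seqs out) := by unfold Spec_indexes_seqs; infer_instance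

-- ===== CLAIM (what is proved, stated in full; the proofs are below) =====
def Claim_equal_indexes_seqs : Prop := ∀ (ol : List String) (value : String) (seqs : List Int), Dom_indexes_seqs ol value seqs → Spec_indexes_seqs ol value seqs (indexes_seqs ol value seqs)

-- ===== LEMMAS AND PROOFS =====

-- the table of indices of occurrences of `value`, with enumeration starting at i0
def occList (ol : List String) (value : String) (i0 : Int) : List Int :=
  (PySem.List.enumerate ol i0).filterMap (fun p => if p.2 = value then some p.1 else none)

theorem occList_nil (value : String) (i0 : Int) : occList [] value i0 = [] := by
  simp [occList, PySem.List.enumerate_nil]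

theorem occList_cons (x : String) (ol : List String) (value : String) (i0 : Int) :
    occList (x :: ol) value i0
      = (if x = value then [i0] else []) ++ occList ol value (i0 + 1) := by
  rw [occList, PySem.List.enumerate_cons, List.filterMap_cons]
  by_cases h : x = value <;> simp [h, occList]

theorem occList_ge (ol : List String) (value : String) (i0 : Int) :
    ∀ j ∈ occList ol value i0, i0 ≤ j := by
  induction ol generalizing i0 with
  | nil => simp [occList_nil]
  | cons x xs ih =>
    intro j hj
    rw [occList_cons] at hj
    rcases List.mem_append.1 hj with h | h
    · split at h <;> simp_all
    · have := ih (i0 + 1) j h; omega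

theorem occList_pairwise (ol : List String) (value : String) (i0 : Int) :
    (occList ol value i0).Pairwise (· < ·) := by
  induction ol generalizing i0 with
  | nil => simp [occList_nil]
  | cons x xs ih =>
    rw [occList_cons]
    refine List.pairwise_append.2 ⟨?_, ih (i0 + 1), ?_⟩
    · split <;> simp
    · intro a ha b hb
      have hb' := occList_ge xs value (i0 + 1) b hb
      split at ha <;> simp_all

-- dropping a prefix keeps exactly the occurrence indices past it
theorem occList_drop (ol : List String) (value : String) :
    ∀ (m : Nat) (i0 : Int),
      occList (ol.drop m) value (i0 + m)
        = (occList ol value i0).filter (fun j => decide (i0 + m ≤ j)) := by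
  induction ol with
  | nil => intro m i0; simp [occList_nil]
  | cons x xs ih =>
    intro m i0
    cases m with
    | zero =>
      simp only [Nat.cast_zero, add_zero, List.drop_zero]
      exact (List.filter_eq_self.2 (fun j hj =>
        decide_eq_true (occList_ge (x :: xs) value i0 j hj))).symm
    | succ m =>
      rw [List.drop_succ_cons, occList_cons, List.filter_append]
      have h1 : occList (xs.drop m) value (i0 + (↑(m + 1) : Int))
          = occList (xs.drop m) value ((i0 + 1) + (m : Int)) := by
        congr 1; push_cast; ring
      have h2 : (occList xs value (i0 + 1)).filter (fun j => decide (i0 + (↑(m + 1) : Int) ≤ j))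
          = (occList xs value (i0 + 1)).filter (fun j => decide ((i0 + 1) + (m : Int) ≤ j)) := by
        apply List.filter_congr; intro j hj
        have : i0 + (↑(m + 1) : Int) = (i0 + 1) + (m : Int) := by push_cast; ring
        rw [this]
      rw [h1, h2, ih m (i0 + 1)]
      have hx : (if x = value then [i0] else []).filter (fun j => decide (i0 + (↑(m + 1) : Int) ≤ j)) = [] := by
        split <;> simp
      rw [hx, List.nil_append]

-- list.index finds the head of the occurrence table
theorem index?_head (ol : List String) (value : String) :
    ∀ (i0 : Int),
      Option.map (fun k : Nat => i0 + (k : Int)) (PySem.List.index? ol value) = (occList ol value i0).head? := by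
  induction ol with
  | nil => intro i0; simp [occList_nil, PySem.List.index?_eq_idxOf?]
  | cons x xs ih =>
    intro i0
    by_cases hx : x = value
    · subst hx
      rw [PySem.List.index?_cons_self, occList_cons]
      simp
    · rw [PySem.List.index?_cons_of_ne xs hx, occList_cons, Option.map_map]
      have : ((fun k : Nat => i0 + (k : Int)) ∘ fun x : Nat => x + 1) = (fun k : Nat => (i0 + 1) + (k : Int)) := by
        funext k; simp; ring
      rw [this, ih (i0 + 1)]
      simp [hx]

-- consuming the head of a filtered strictly increasing list
theorem filter_ge_step (l : List Int) (hl : l.Pairwise (· < ·)) :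
    ∀ (pos i : Int) (t : List Int),
      l.filter (fun j => decide (pos ≤ j)) = i :: t →
      l.filter (fun j => decide (i + 1 ≤ j)) = t ∧ pos ≤ i := by
  induction l with
  | nil => intro pos i t h; simp at h
  | cons a l ih =>
    have ha := List.pairwise_cons.1 hl
    intro pos i t h
    by_cases hpa : pos ≤ a
    · rw [List.filter_cons_of_pos (by simpa using hpa)] at h
      obtain ⟨rfl, rfl⟩ : a = i ∧ l.filter (fun j => decide (pos ≤ j)) = t := by
        simpa using h
      refine ⟨?_, hpa⟩
      rw [List.filter_cons_of_neg (by simp)]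
      have hall : ∀ b ∈ l, a < b := ha.1
      rw [List.filter_eq_self.2 (fun b hb => by simpa using by have := hall b hb; omega),
        List.filter_eq_self.2 (fun b hb => by simpa using by have := hall b hb; omega)]
    · rw [List.filter_cons_of_neg (by simpa using hpa)] at h
      obtain ⟨h1, h2⟩ := ih ha.2 pos i t h
      have hi : i ∈ l := List.mem_of_mem_filter (h ▸ List.mem_cons_self ..)
      refine ⟨?_, h2⟩
      rw [List.filter_cons_of_neg (by have := ha.1 i hi; simp; omega)]
      exact h1

-- nthAfter, characterised against the occurrence table
theorem nthAfter_spec (ol : List String) (value : String) :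
    ∀ (n : Nat) (pos : Int) (m : List Int), 0 ≤ pos →
      (occList ol value 0).filter (fun j => decide (pos ≤ j)) = m → 1 ≤ n →
      nthAfter ol value pos n = (m[n-1]?).map (· + 1)
      ∧ ∀ i, m[n-1]? = some i →
          (occList ol value 0).filter (fun j => decide (i + 1 ≤ j)) = m.drop n := by
  have hnext : ∀ pos : Int, 0 ≤ pos →
      Option.map (fun k : Nat => pos + (k : Int)) (PySem.List.index? (ol.drop pos.toNat) value)
        = ((occList ol value 0).filter (fun j => decide (pos ≤ j))).head? := by
    intro pos hpos
    rw [index?_head (ol.drop pos.toNat) value pos]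
    have h0 : (0 : Int) + (pos.toNat : Int) = pos := by omega
    have := occList_drop ol value pos.toNat 0
    rw [h0] at this
    rw [this]
  intro n
  induction n with
  | zero => intro pos m _ _ hn; omega
  | succ n ihn =>
    intro pos m hpos hm _
    simp only [nthAfter]
    rw [hnext pos hpos, hm]
    cases m with
    | nil =>
      refine ⟨?_, by intro i h; simp at h⟩
      simp
    | cons i t =>
      simp only [List.head?_cons]
      have hstep := filter_ge_step (occList ol value 0) (occList_pairwise ol value 0) pos i t hm
      cases n with
      | zero =>
        refine ⟨by simp [nthAfter], ?_⟩
        intro j hj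
        obtain rfl : i = j := by simpa using hj
        simpa using hstep.1
      | succ n' =>
        have hIH := ihn (i + 1) t (by omega) hstep.1 (by omega)
        refine ⟨?_, ?_⟩
        · show nthAfter ol value (i + 1) (n' + 1) = _
          rw [hIH.1]
          simp
        · intro j hj
          simp only [Nat.add_sub_cancel, List.getElem?_cons_succ] at hj ⊢
          have := hIH.2 j (by simpa using hj)
          simpa using this

theorem enumerate_fst_le {α : Type} (xs : List α) :
    ∀ (s : Int) (p : Int × α), p ∈ PySem.List.enumerate xs s → s ≤ p.1 := by
  induction xs with
  | nil => simp [PySem.List.enumerate_nil]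
  | cons x xs ih =>
    intro s p hp
    rw [PySem.List.enumerate_cons] at hp
    rcases List.mem_cons.1 hp with h | h
    · subst h; simp
    · have := ih (s + 1) p h; omega

-- skipping negative ranks is filtering them out up front
theorem selLoop_filter (ol : List String) (value : String) :
    ∀ (ks : List Int) (pos prev : Int),
      selLoop ol value ks pos prev = selLoop ol value (ks.filter (fun k => decide (0 ≤ k))) pos prev := by
  intro ks
  induction ks with
  | nil => intro pos prev; rfl
  | cons k ks ih =>
    intro pos prev
    by_cases hk : k < 0
    · rw [List.filter_cons_of_neg (by simp; omega)]
      simp only [selLoop, if_pos hk]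
      exact ih pos prev
    · rw [List.filter_cons_of_pos (by simp; omega)]
      simp only [selLoop, if_neg hk]
      cases nthAfter ol value pos (k - prev).toNat with
      | none => rfl
      | some pos' =>
        show (pos' - 1) :: selLoop ol value ks pos' k = (pos' - 1) :: _
        rw [ih pos' k]

-- the main loop of B selects the occurrence table at the requested ranks
theorem selLoop_spec (ol : List String) (value : String) :
    ∀ (ks : List Int) (pos prev : Int),
      ks.Pairwise (· < ·) → (∀ k ∈ ks, 0 ≤ k ∧ prev < k) → 0 ≤ pos → -1 ≤ prev →
      (occList ol value 0).filter (fun j => decide (pos ≤ j)) = (occList ol value 0).drop (prev + 1).toNat →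
      selLoop ol value ks pos prev = ks.filterMap (fun k => (occList ol value 0)[k.toNat]?) := by
  intro ks
  induction ks with
  | nil => intro pos prev _ _ _ _ _; rfl
  | cons k ks ih =>
    intro pos prev hpw hk hpos hprev hF
    have hk0 : 0 ≤ k := (hk k (List.mem_cons_self ..)).1
    have hprevk : prev < k := (hk k (List.mem_cons_self ..)).2
    have hpw' := List.pairwise_cons.1 hpw
    simp only [selLoop, if_neg (by omega : ¬ k < 0)]
    have hn1 : 1 ≤ (k - prev).toNat := by omega
    have hN := nthAfter_spec ol value ((k - prev).toNat) pos
      ((occList ol value 0).drop (prev + 1).toNat) hpos hF hn1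
    have hidx : ((occList ol value 0).drop (prev + 1).toNat)[(k - prev).toNat - 1]?
        = (occList ol value 0)[k.toNat]? := by
      rw [List.getElem?_drop]
      congr 1
      omega
    rw [hidx] at hN
    rw [List.filterMap_cons]
    cases hx : (occList ol value 0)[k.toNat]? with
    | none =>
      rw [hx] at hN
      rw [hN.1]
      have hlen : (occList ol value 0).length ≤ k.toNat := List.getElem?_eq_none_iff.1 hx
      simp only [Option.map_none]
      symm
      apply List.filterMap_eq_nil_iff.2
      intro k' hk'
      have hkk' : k < k' := hpw'.1 k' hk'
      exact List.getElem?_eq_none_iff.2 (by omega)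
    | some i =>
      rw [hx] at hN
      rw [hN.1]
      simp only [Option.map_some]
      have hmem : i ∈ occList ol value 0 := by
        have := List.getElem?_eq_some_iff.1 hx
        obtain ⟨h1, h2⟩ := this
        exact h2 ▸ List.getElem_mem h1
      have hi0 : 0 ≤ i := occList_ge ol value 0 i hmem
      have hF' : (occList ol value 0).filter (fun j => decide (i + 1 ≤ j))
          = (occList ol value 0).drop (k + 1).toNat := by
        have h2 := hN.2 i rfl
        rw [List.drop_drop] at h2
        rw [h2]
        congr 1
        omega
      rw [ih (i + 1) k hpw'.2 (fun k' hk' => ⟨by have := hpw'.1 k' hk'; omega, hpw'.1 k' hk'⟩)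
        (by omega) (by omega) hF']
      have : i + 1 - 1 = i := by omega
      rw [this]

-- rank-membership selection over an enumeration equals indexing by the sorted rank list
theorem enumerate_filterMap_eq_index :
    ∀ (l : List Int) (s : Int) (K : List Int), K.Pairwise (· < ·) → (∀ k ∈ K, s ≤ k) →
      (PySem.List.enumerate l s).filterMap (fun p => if p.1 ∈ K then some p.2 else none)
        = K.filterMap (fun k => l[(k - s).toNat]?) := by
  intro l
  induction l with
  | nil =>
    intro s K _ _
    rw [PySem.List.enumerate_nil]
    simp
  | cons x t ih =>
    intro s K hpw hK
    rw [PySem.List.enumerate_cons, List.filterMap_cons]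
    by_cases hs : s ∈ K
    · obtain ⟨K', rfl⟩ : ∃ K', K = s :: K' := by
        cases K with
        | nil => simp at hs
        | cons a K' =>
          have has : s ≤ a := hK a (List.mem_cons_self ..)
          have : a = s := by
            rcases List.mem_cons.1 hs with h | h
            · omega
            · have := (List.pairwise_cons.1 hpw).1 s h; omega
          exact ⟨K', by rw [this]⟩
      simp only [if_pos hs]
      have hpw' := List.pairwise_cons.1 hpw
      rw [List.filterMap_congr (g := fun p : Int × Int => if p.1 ∈ K' then some p.2 else none)
        (by
          intro p hp
          have hps := enumerate_fst_le t (s + 1) p hp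
          have : p.1 ∈ s :: K' ↔ p.1 ∈ K' := by
            rw [List.mem_cons]
            constructor
            · rintro (h | h); · omega
              · exact h
            · exact Or.inr
          simp only [this]),
        ih (s + 1) K' hpw'.2 (fun k hk => by have := hpw'.1 k hk; omega),
        List.filterMap_cons]
      have hfk : (x :: t)[(s - s).toNat]? = some x := by simp
      rw [hfk]
      congr 1
      apply List.filterMap_congr
      intro k hk
      have hks : s < k := hpw'.1 k hk
      have harith : (k - s).toNat = (k - (s + 1)).toNat + 1 := by omega
      rw [harith, List.getElem?_cons_succ]
    · simp only [if_neg hs]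
      have hK' : ∀ k ∈ K, s + 1 ≤ k := by
        intro k hk
        have := hK k hk
        rcases eq_or_lt_of_le this with h | h
        · exact absurd (h ▸ hk) hs
        · omega
      rw [ih (s + 1) K hpw hK']
      apply List.filterMap_congr
      intro k hk
      have := hK' k hk
      have harith : (k - s).toNat = (k - (s + 1)).toNat + 1 := by omega
      rw [harith, List.getElem?_cons_succ]

-- A's loop over enumerate, with accumulator acc and counter seq, produces acc followed by
-- the rank-membership selection over the occurrence table of the rest, ranks from seq + 1
theorem indexes_seqs_loop_eq (value : String) (seqs : List Int)
    (ol : List String) (i0 seq : Int) (acc : List Int) :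
    ((PySem.List.enumerate ol i0).foldl
      (fun (st : List Int × Int) (p : Int × String) =>
        if value = p.2 then
          if st.2 + 1 ∈ seqs then (st.1 ++ [p.1], st.2 + 1) else (st.1, st.2 + 1)
        else st)
      (acc, seq)).1
    = acc ++ (PySem.List.enumerate (occList ol value i0) (seq + 1)).filterMap
        (fun p => if p.1 ∈ PySem.Set.ofList seqs then some p.2 else none) := by
  induction ol generalizing i0 seq acc with
  | nil => simp [occList_nil, PySem.List.enumerate_nil]
  | cons x xs ih =>
    rw [PySem.List.enumerate_cons, occList_cons]
    simp only [List.foldl_cons]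
    by_cases hx : value = x
    · simp only [if_pos hx, if_pos hx.symm, List.singleton_append,
        PySem.List.enumerate_cons, List.filterMap_cons]
      by_cases hs : seq + 1 ∈ seqs
      · rw [if_pos hs, ih (i0 + 1) (seq + 1) (acc ++ [i0])]
        simp [PySem.Set.mem_ofList, hs]
      · rw [if_neg hs, ih (i0 + 1) (seq + 1) acc]
        simp [PySem.Set.mem_ofList, hs]
    · simp only [if_neg hx, if_neg (fun h : x = value => hx h.symm), List.nil_append]
      exact ih (i0 + 1) seq acc

-- ===== VERDICT (by name: the statement is the Claim_ definition above) =====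
theorem indexes_seqs_spec : Claim_equal_indexes_seqs := by
  intro ol value seqs _
  show indexes_seqs ol value seqs = indexes_seqs_alt ol value seqs
  -- A's loop as a rank-membership selection over the occurrence table
  have hA := indexes_seqs_loop_eq value seqs ol 0 (-1) []
  conv at hA => lhs; rw [PySem.List.enumerate_eq_map_pyRange ol "", List.foldl_map]
  have hA' : indexes_seqs ol value seqs
      = (PySem.List.enumerate (occList ol value 0) 0).filterMap
          (fun p => if p.1 ∈ PySem.Set.ofList seqs then some p.2 else none) := by
    simpa [indexes_seqs] using hA
  -- B as indexing the occurrence table by the sorted nonnegative ranks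
  have hpw : (PySem.List.sorted (PySem.Set.ofList seqs) (fun x => x) false).Pairwise (· < ·) :=
    PySem.List.sorted_ofList_pairwise_lt seqs
  have hpwp : ((PySem.List.sorted (PySem.Set.ofList seqs) (fun x => x) false).filter
      (fun k => decide (0 ≤ k))).Pairwise (· < ·) := hpw.filter _
  have hB : indexes_seqs_alt ol value seqs
      = ((PySem.List.sorted (PySem.Set.ofList seqs) (fun x => x) false).filter
          (fun k => decide (0 ≤ k))).filterMap (fun k => (occList ol value 0)[k.toNat]?) := by
    rw [indexes_seqs_alt, selLoop_filter ol value _ 0 (-1)]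
    apply selLoop_spec ol value _ 0 (-1) hpwp
    · intro k hk
      have := List.of_mem_filter hk
      have h0 : (0 : Int) ≤ k := by simpa using this
      exact ⟨h0, by omega⟩
    · omega
    · omega
    · have : ((-1 : Int) + 1).toNat = 0 := by omega
      rw [this, List.drop_zero]
      exact List.filter_eq_self.2 (fun j hj => decide_eq_true (occList_ge ol value 0 j hj))
  rw [hA', hB]
  rw [List.filterMap_congr
    (g := fun p : Int × Int =>
      if p.1 ∈ (PySem.List.sorted (PySem.Set.ofList seqs) (fun x => x) false).filter
        (fun k => decide (0 ≤ k)) then some p.2 else none)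
    (by
      intro p hp
      have h0 := enumerate_fst_le (occList ol value 0) 0 p hp
      have hiff : (p.1 ∈ PySem.Set.ofList seqs)
          ↔ (p.1 ∈ (PySem.List.sorted (PySem.Set.ofList seqs) (fun x => x) false).filter
              (fun k => decide (0 ≤ k))) := by
        rw [List.mem_filter, PySem.List.mem_sorted]
        constructor
        · intro h; exact ⟨h, by simpa using h0⟩
        · intro h; exact h.1
      exact if_congr hiff rfl rfl)]
  rw [enumerate_filterMap_eq_index (occList ol value 0) 0 _ hpwp
    (fun k hk => by simpa using List.of_mem_filter hk)]
  apply List.filterMap_congr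
  intro k _
  have : (k - 0).toNat = k.toNat := by omega
  rw [this]
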